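-- pv_equiv track=rewrite | github.com/debroy2021/GuessTheWord | project.py | filterByDifficulty
-- ===== SOURCE A (Python) =====
-- def filterByDifficulty(words, difficulty):
--     updatedWords = []
--     for word in words:
--         if (difficulty == "easy" and len(word) < 7):
--             updatedWords.append(word)
--         elif (difficulty == "medium" and len(word) >= 7 and len(word) < 10):
--             updatedWords.append(word)
--         elif (difficulty == "hard" and len(word) >= 10 and len(word) < 13):
--             updatedWords.append(word)
--         elif (difficulty == "hell" and len(word) >= 13 and len(word) < 15):
--             updatedWords.append(word)
--     return updatedWords
-- ===== SOURCE B (Python) =====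
-- # B: bucket word indices by length in one pass, gather the buckets of the
-- # difficulty's length range, sort indices to restore order, map back to words.
-- def filterByDifficulty(words, difficulty):
--     bounds = {"easy": (0, 7), "medium": (7, 10), "hard": (10, 13), "hell": (13, 15)}
--     if difficulty not in bounds:
--         return []
--     lo, hi = bounds[difficulty]
--     buckets = {}
--     for i, w in enumerate(words):
--         buckets.setdefault(len(w), []).append(i)
--     idxs = []
--     for L in range(lo, hi):
--         idxs.extend(buckets.get(L, []))
--     idxs.sort()
--     return [words[i] for i in idxs]
-- ===== Notes on version B (the rewrite author's own statement) =====
-- stated objective: alternative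
-- what changed: Instead of testing each word against four difficulty branches, B buckets word indices by length in one pass, concatenates the buckets for the difficulty's length range, sorts the indices to restore input order, and maps them back to words.
import Mathlib
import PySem

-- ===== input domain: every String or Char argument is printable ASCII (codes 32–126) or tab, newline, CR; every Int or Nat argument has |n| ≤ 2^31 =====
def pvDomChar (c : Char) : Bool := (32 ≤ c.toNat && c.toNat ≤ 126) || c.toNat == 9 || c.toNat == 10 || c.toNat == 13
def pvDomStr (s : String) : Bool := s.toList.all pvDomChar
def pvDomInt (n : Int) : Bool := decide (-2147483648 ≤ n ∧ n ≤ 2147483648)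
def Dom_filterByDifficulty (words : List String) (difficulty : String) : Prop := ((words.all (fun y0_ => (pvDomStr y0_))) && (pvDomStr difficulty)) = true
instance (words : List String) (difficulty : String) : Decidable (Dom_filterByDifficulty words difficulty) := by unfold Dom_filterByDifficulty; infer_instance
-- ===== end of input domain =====

-- B replaces A's per-word branch tests by length bucketing: bucket indices by word length,
-- gather the buckets of the difficulty's length range, sort the indices, map back to words
-- (objective: alternative algorithm, same results).

-- ===== PORT A =====
def filterByDifficulty (words : List String) (difficulty : String) : List String :=
  words.foldl (fun updatedWords word =>
    if difficulty == "easy" && PySem.Str.len word < 7 then updatedWords ++ [word]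
    else if difficulty == "medium" && PySem.Str.len word ≥ 7 && PySem.Str.len word < 10 then updatedWords ++ [word]
    else if difficulty == "hard" && PySem.Str.len word ≥ 10 && PySem.Str.len word < 13 then updatedWords ++ [word]
    else if difficulty == "hell" && PySem.Str.len word ≥ 13 && PySem.Str.len word < 15 then updatedWords ++ [word]
    else updatedWords) []

-- ===== PORT B =====
def pvBounds : PySem.Dict String (Int × Int) :=
  PySem.Dict.ofList [("easy", (0, 7)), ("medium", (7, 10)), ("hard", (10, 13)), ("hell", (13, 15))]

def filterByDifficulty_alt (words : List String) (difficulty : String) : List String :=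
  match PySem.Dict.get? pvBounds difficulty with
  | none => []
  | some (lo, hi) =>
    -- buckets.setdefault(len(w), []).append(i)  ==  modify (len w) [] (· ++ [i])
    let buckets : PySem.Dict Int (List Int) :=
      (PySem.List.enumerate words).foldl
        (fun d p => d.modify (PySem.Str.len p.2) [] (fun b => b ++ [p.1])) PySem.Dict.empty
    let idxs : List Int :=
      (PySem.List.pyRange lo hi 1).foldl (fun acc L => acc ++ buckets.getD L []) []
    (PySem.List.sorted idxs (fun i => i) false).map (fun i => PySem.List.pyGetD words i "")

-- ===== PRECONDITION & SPEC =====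
def Spec_filterByDifficulty (words : List String) (difficulty : String) (out : List String) : Prop := out = filterByDifficulty_alt words difficulty
instance (words : List String) (difficulty : String) (out : List String) : Decidable (Spec_filterByDifficulty words difficulty out) := by unfold Spec_filterByDifficulty; infer_instance

-- ===== CLAIM (what is proved, stated in full; the proofs are below) =====
def Claim_equal_filterByDifficulty : Prop := ∀ (words : List String) (difficulty : String), Dom_filterByDifficulty words difficulty → Spec_filterByDifficulty words difficulty (filterByDifficulty words difficulty)

-- ===== LEMMAS AND PROOFS =====

-- A's fold is a filter by the branch disjunction.
theorem filterA_eq_filter (words : List String) (difficulty : String) :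
    filterByDifficulty words difficulty =
      words.filter (fun word =>
        (difficulty == "easy" && PySem.Str.len word < 7) ||
        (difficulty == "medium" && PySem.Str.len word ≥ 7 && PySem.Str.len word < 10) ||
        (difficulty == "hard" && PySem.Str.len word ≥ 10 && PySem.Str.len word < 13) ||
        (difficulty == "hell" && PySem.Str.len word ≥ 13 && PySem.Str.len word < 15)) := by
  unfold filterByDifficulty
  have hbody : (fun (updatedWords : List String) (word : String) =>
        if difficulty == "easy" && PySem.Str.len word < 7 then updatedWords ++ [word]
        else if difficulty == "medium" && PySem.Str.len word ≥ 7 && PySem.Str.len word < 10 then updatedWords ++ [word]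
        else if difficulty == "hard" && PySem.Str.len word ≥ 10 && PySem.Str.len word < 13 then updatedWords ++ [word]
        else if difficulty == "hell" && PySem.Str.len word ≥ 13 && PySem.Str.len word < 15 then updatedWords ++ [word]
        else updatedWords)
      = (fun (acc : List String) (word : String) =>
        if ((difficulty == "easy" && PySem.Str.len word < 7) ||
            (difficulty == "medium" && PySem.Str.len word ≥ 7 && PySem.Str.len word < 10) ||
            (difficulty == "hard" && PySem.Str.len word ≥ 10 && PySem.Str.len word < 13) ||
            (difficulty == "hell" && PySem.Str.len word ≥ 13 && PySem.Str.len word < 15)) then acc ++ [word]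
        else acc) := by
    funext acc w
    cases h1 : (difficulty == "easy" && PySem.Str.len w < 7) <;>
    cases h2 : (difficulty == "medium" && PySem.Str.len w ≥ 7 && PySem.Str.len w < 10) <;>
    cases h3 : (difficulty == "hard" && PySem.Str.len w ≥ 10 && PySem.Str.len w < 13) <;>
    cases h4 : (difficulty == "hell" && PySem.Str.len w ≥ 13 && PySem.Str.len w < 15) <;>
    simp only [Bool.or_true, Bool.or_false,
      Bool.false_eq_true, ite_true, ite_false]
  rw [hbody]
  rw [PySem.List.foldl_append_if_eq_filter]
  simp

-- Disjoint Bool predicates: a filter by the disjunction splits as a permutation.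
theorem filter_or_perm {α : Type} (p q : α → Bool) (l : List α)
    (h : ∀ x, ¬(p x = true ∧ q x = true)) :
    (l.filter (fun x => p x || q x)).Perm (l.filter p ++ l.filter q) := by
  induction l with
  | nil => simp
  | cons a t ih =>
    by_cases hp : p a = true
    · have hq : q a = false := by
        cases hqa : q a
        · rfl
        · exact absurd ⟨hp, hqa⟩ (h a)
      simpa [List.filter_cons, hp, hq] using ih.cons a
    · have hp' : p a = false := by simpa using hp
      cases hq : q a
      · simpa [List.filter_cons, hp', hq] using ih
      · simp only [List.filter_cons, hp', hq, Bool.false_or]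
        exact (ih.cons a).trans (List.perm_middle.symm)

-- Gathering per-length buckets over a duplicate-free list of lengths is a
-- permutation of the single filter by membership.
theorem flatMap_buckets_perm (l : List (Int × Int)) (R : List Int) (hR : R.Nodup) :
    (R.flatMap (fun L => (l.filter (fun q => q.1 == L)).map (·.2))).Perm
      ((l.filter (fun q => decide (q.1 ∈ R))).map (·.2)) := by
  induction R with
  | nil => simp
  | cons L R ih =>
    have hLR : L ∉ R := (List.nodup_cons.mp hR).1
    have ih' := ih (List.nodup_cons.mp hR).2
    have heq : (fun (q : Int × Int) => decide (q.1 ∈ L :: R))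
        = (fun (q : Int × Int) => (q.1 == L) || decide (q.1 ∈ R)) := by
      funext q
      by_cases h : q.1 = L <;> simp [h]
    have hsplit : (l.filter (fun q => decide (q.1 ∈ L :: R))).Perm
        (l.filter (fun q => q.1 == L) ++ l.filter (fun q => decide (q.1 ∈ R))) := by
      rw [heq]
      refine filter_or_perm _ _ _ ?_
      rintro q ⟨h1, h2⟩
      apply hLR
      have hq : q.1 = L := by simpa using h1
      have : q.1 ∈ R := by simpa using h2
      rwa [hq] at this
    rw [List.flatMap_cons]
    refine (ih'.append_left _).trans ?_
    rw [← List.map_append]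
    exact (hsplit.map _).symm

-- B's some-branch computes exactly the length-range filter.
theorem alt_body_eq (words : List String) (lo hi : Int) :
    ((PySem.List.sorted
        ((PySem.List.pyRange lo hi 1).foldl
          (fun acc L =>
            acc ++ (((PySem.List.enumerate words).foldl
              (fun d p => d.modify (PySem.Str.len p.2) [] (fun b => b ++ [p.1]))
              PySem.Dict.empty).getD L []))
          [])
        (fun i => i) false).map (fun i => PySem.List.pyGetD words i ""))
      = words.filter (fun w => decide (lo ≤ PySem.Str.len w ∧ PySem.Str.len w < hi)) := by
  have hfm := List.foldl_map (f := fun p : Int × String => (PySem.Str.len p.2, p.1))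
    (g := fun (d : PySem.Dict Int (List Int)) (q : Int × Int) => d.modify q.1 [] (fun b => b ++ [q.2]))
    (l := PySem.List.enumerate words) (init := PySem.Dict.empty)
  have hbuckets : ∀ L : Int,
      ((PySem.List.enumerate words).foldl
        (fun d p => d.modify (PySem.Str.len p.2) [] (fun b => b ++ [p.1]))
        PySem.Dict.empty).getD L []
      = ((((PySem.List.enumerate words).map (fun p => (PySem.Str.len p.2, p.1))).filter
          (fun q => q.1 == L)).map (·.2)) := by
    intro L
    rw [← hfm, PySem.Dict.getD_foldl_modify_append, PySem.Dict.getD_empty, List.nil_append]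
  rw [PySem.List.foldl_append_eq_flatMap, List.nil_append]
  simp only [hbuckets]
  have hperm := flatMap_buckets_perm
    ((PySem.List.enumerate words).map (fun p => (PySem.Str.len p.2, p.1)))
    (PySem.List.pyRange lo hi 1) (PySem.List.nodup_pyRange_one lo hi)
  have hys_eq : ((((PySem.List.enumerate words).map (fun p => (PySem.Str.len p.2, p.1))).filter
        (fun q => decide (q.1 ∈ PySem.List.pyRange lo hi 1))).map (·.2))
      = (((PySem.List.enumerate words).filter
          (fun p => decide (lo ≤ PySem.Str.len p.2 ∧ PySem.Str.len p.2 < hi))).map (·.1)) := by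
    rw [List.filter_map, List.map_map]
    have h1 : ((fun (q : Int × Int) => decide (q.1 ∈ PySem.List.pyRange lo hi 1)) ∘
        (fun (p : Int × String) => (PySem.Str.len p.2, p.1)))
        = (fun p => decide (lo ≤ PySem.Str.len p.2 ∧ PySem.Str.len p.2 < hi)) := by
      funext p
      simp [PySem.List.mem_pyRange_one]
    rw [h1]
    rfl
  rw [hys_eq] at hperm
  have hpw : (((PySem.List.enumerate words).filter
      (fun p => decide (lo ≤ PySem.Str.len p.2 ∧ PySem.Str.len p.2 < hi))).map (·.1)).Pairwise
      (fun a b => (fun i => i) a < (fun i => i) b) := by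
    have h1 : ((PySem.List.enumerate words).map (·.1)).Pairwise (· < ·) := by
      rw [PySem.List.map_fst_enumerate]
      exact PySem.List.pairwise_lt_pyRange_one 0 _
    have h2 : (PySem.List.enumerate words).Pairwise (fun p q => p.1 < q.1) :=
      (List.pairwise_map).mp h1
    exact (List.pairwise_map).mpr (h2.sublist List.filter_sublist)
  rw [PySem.List.sorted_eq_of_perm_of_pairwise_lt _ _ _ hperm.symm hpw]
  rw [List.map_map]
  have hmem : ∀ p ∈ (PySem.List.enumerate words).filter
      (fun p => decide (lo ≤ PySem.Str.len p.2 ∧ PySem.Str.len p.2 < hi)),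
      ((fun i => PySem.List.pyGetD words i "") ∘ (·.1)) p = p.2 := by
    intro p hp
    have hp' : p ∈ PySem.List.enumerate words := List.mem_of_mem_filter hp
    obtain ⟨k, hk, hkp⟩ := List.getElem_of_mem hp'
    rw [PySem.List.getElem_enumerate] at hkp
    have hklen : k < words.length := by
      have := PySem.List.length_enumerate words 0
      omega
    subst hkp
    simp [PySem.List.pyGetD_natCast, List.getD_eq_getElem?_getD, hklen]
  rw [List.map_congr_left hmem]
  conv_rhs => rw [← PySem.List.map_snd_enumerate words 0, List.filter_map]
  rfl

-- B with a recognised difficulty: unfold the bounds lookup.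
theorem alt_some (words : List String) (difficulty : String) (lo hi : Int)
    (h : PySem.Dict.get? pvBounds difficulty = some (lo, hi)) :
    filterByDifficulty_alt words difficulty
      = words.filter (fun w => decide (lo ≤ PySem.Str.len w ∧ PySem.Str.len w < hi)) := by
  unfold filterByDifficulty_alt
  rw [h]
  exact alt_body_eq words lo hi

-- ===== VERDICT (by name: the statement is the Claim_ definition above) =====
theorem filterByDifficulty_spec : Claim_equal_filterByDifficulty := by
  intro words difficulty _
  unfold Spec_filterByDifficulty
  rw [filterA_eq_filter]
  by_cases he : difficulty = "easy"
  · subst he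
    rw [alt_some words "easy" 0 7 (by decide)]
    refine List.filter_congr ?_
    intro w _
    simp [PySem.Str.len_eq]
  · by_cases hm : difficulty = "medium"
    · subst hm
      rw [alt_some words "medium" 7 10 (by decide)]
      refine List.filter_congr ?_
      intro w _
      simp [PySem.Str.len_eq]
    · by_cases hh : difficulty = "hard"
      · subst hh
        rw [alt_some words "hard" 10 13 (by decide)]
        refine List.filter_congr ?_
        intro w _
        simp [PySem.Str.len_eq]
      · by_cases hl : difficulty = "hell"
        · subst hl
          rw [alt_some words "hell" 13 15 (by decide)]
          refine List.filter_congr ?_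
          intro w _
          simp [PySem.Str.len_eq]
        · have hit : pvBounds.items = [("easy", (0, 7)), ("medium", (7, 10)), ("hard", (10, 13)), ("hell", (13, 15))] := by decide
          have h : PySem.Dict.get? pvBounds difficulty = none := by
            simp [PySem.Dict.get?, hit, List.find?_eq_none]
            exact ⟨Ne.symm he, Ne.symm hm, Ne.symm hh, Ne.symm hl⟩
          unfold filterByDifficulty_alt
          rw [h]
          simp [he, hm, hh, hl]
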